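-- pv_equiv track=rewrite | github.com/WGUNDERWOOD/goodstein-calculator | goodstein_calculator.py | expand_in_base
-- ===== SOURCE A (Python) =====
-- def expand_in_base(n, b):
--
--   '''expand n in base b, and return a human-readable string'''
--
--   if not type(n) == int:
--     raise(TypeError("n must be an integer"))
--
--   if not n >= 0:
--     raise(ValueError("n must be non-negative"))
--
--   if not type(b) == int:
--     raise(TypeError("b must be an integer"))
--
--   if not b >= 2:
--     raise(ValueError("b must be at least 2"))
--
--   # write n in b-ary
--   raw_string = ""
--   raw_list = []
--
--   i = 0
--   while n > 0:
--     raw_string = str(n % b) + raw_string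
--     raw_list.insert(0, str(n % b))
--     n //= b
--     i += 1
--
--   # make readable
--   n_digits = len(raw_list)
--   readable_list = n_digits * [None]
--   for k in range(n_digits):
--
--     coefficient = raw_list[k]
--     power = str(n_digits - k - 1)
--     base = str(b)
--
--     if coefficient == "0":
--       readable_list[k] = ""
--
--     elif coefficient == "1":
--       if power == "0":
--         readable_list[k] = "1"
--       elif power == "1":
--         readable_list[k] = base
--       else:
--         readable_list[k] = base + "^" + power
--
--     else:
--       if power == "0":
--         readable_list[k] = coefficient
--       elif power == "1":
--         readable_list[k] = coefficient + "*" + base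
--       else:
--         readable_list[k] = coefficient + "*" + base + "^" + power
--
--   readable_string = "+".join([s for s in readable_list if not s ==""])
--
--   return readable_string
-- ===== SOURCE B (Python) =====
-- def expand_in_base(n, b):
--
--   '''expand n in base b, and return a human-readable string'''
--
--   if not type(n) == int:
--     raise(TypeError("n must be an integer"))
--
--   if not n >= 0:
--     raise(ValueError("n must be non-negative"))
--
--   if not type(b) == int:
--     raise(TypeError("b must be an integer"))
--
--   if not b >= 2:
--     raise(ValueError("b must be at least 2"))
--
--   # single pass: the loop counter i IS the digit's power; format each
--   # non-zero digit immediately, then reverse for most-significant-first order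
--   terms = []
--   i = 0
--   while n > 0:
--     d = n % b
--     if d > 0:
--       if d == 1:
--         if i == 0:
--           terms.append("1")
--         elif i == 1:
--           terms.append(str(b))
--         else:
--           terms.append(str(b) + "^" + str(i))
--       elif i == 0:
--         terms.append(str(d))
--       elif i == 1:
--         terms.append(str(d) + "*" + str(b))
--       else:
--         terms.append(str(d) + "*" + str(b) + "^" + str(i))
--     n //= b
--     i += 1
--
--   return "+".join(reversed(terms))
-- ===== Notes on version B (the rewrite author's own statement) =====
-- stated objective: simpler
-- what changed: B formats each digit in the single division loop, taking the power directly from the loop counter, and reverses the term list at the end; A's front-inserted raw digit list, digit count and second indexing pass over range(n_digits) are gone.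
import Mathlib
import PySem

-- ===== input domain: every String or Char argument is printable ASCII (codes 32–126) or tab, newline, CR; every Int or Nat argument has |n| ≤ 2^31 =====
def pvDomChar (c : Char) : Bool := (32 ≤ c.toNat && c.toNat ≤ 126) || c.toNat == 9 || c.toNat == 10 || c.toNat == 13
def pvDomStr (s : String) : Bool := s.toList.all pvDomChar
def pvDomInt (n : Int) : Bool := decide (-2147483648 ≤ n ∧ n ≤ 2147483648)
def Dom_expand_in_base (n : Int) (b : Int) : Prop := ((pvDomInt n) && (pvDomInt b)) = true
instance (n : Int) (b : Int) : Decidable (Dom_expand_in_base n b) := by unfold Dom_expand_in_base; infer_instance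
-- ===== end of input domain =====

-- B formats digits inside the single division loop (power = loop counter) and reverses at
-- the end, instead of A's front-inserted digit list plus a second indexing pass: simpler.

-- ===== PORT A =====
-- termination helper for both division loops (cited by decreasing_by)
lemma pv_floordiv_toNat_lt (n b : Int) (h : 0 < n ∧ 2 ≤ b) :
    (PySem.Int.floordiv n b).toNat < n.toNat := by
  rw [PySem.Int.floordiv_eq_ediv_of_pos (by omega)]
  have hlt : n / b < n := by
    apply Int.ediv_lt_of_lt_mul (by omega)
    nlinarith [h.1, h.2]
  have hnn : 0 ≤ n / b := Int.ediv_nonneg (by omega) (by omega)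
  omega

-- A's while loop building raw_list: each iteration front-inserts str(n % b), so the
-- recursive call's digits (those of n // b) end up in front of this digit
def pyRawList (n : Int) (b : Int) : List String :=
  if h : 0 < n ∧ 2 ≤ b then
    pyRawList (PySem.Int.floordiv n b) b ++ [PySem.Int.toStr (PySem.Int.mod n b)]
  else []
termination_by n.toNat
decreasing_by exact pv_floordiv_toNat_lt n b h

-- the if/elif/else ladder of A's second loop, verbatim
def fmtA (coefficient : String) (power : String) (base : String) : String :=
  if coefficient = "0" then ""
  else if coefficient = "1" then
    (if power = "0" then "1"
     else if power = "1" then base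
     else base ++ "^" ++ power)
  else
    (if power = "0" then coefficient
     else if power = "1" then coefficient ++ "*" ++ base
     else coefficient ++ "*" ++ base ++ "^" ++ power)

def expand_in_base (n : Int) (b : Int) : String :=
  -- A raises TypeError/ValueError unless n ≥ 0 and b ≥ 2 (those inputs are outside Pre_)
  if n < 0 ∨ b < 2 then "" else
  let raw_list := pyRawList n b
  let n_digits := raw_list.length
  let readable_list := (List.range n_digits).map (fun k =>
    fmtA (raw_list.getD k "") (PySem.Int.toStr ((n_digits : Int) - (k : Int) - 1))
      (PySem.Int.toStr b))
  PySem.Str.join "+" (readable_list.filter (fun s => !(s == "")))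

-- ===== PORT B =====
-- B's if-ladder on the int digit d and int counter i (only reached when 0 < d)
def fmtB (d : Int) (b : Int) (i : Int) : String :=
  if d = 1 then
    (if i = 0 then "1"
     else if i = 1 then PySem.Int.toStr b
     else PySem.Int.toStr b ++ "^" ++ PySem.Int.toStr i)
  else if i = 0 then PySem.Int.toStr d
  else if i = 1 then PySem.Int.toStr d ++ "*" ++ PySem.Int.toStr b
  else PySem.Int.toStr d ++ "*" ++ PySem.Int.toStr b ++ "^" ++ PySem.Int.toStr i

-- B's single loop: terms appended least-significant first, power = counter i
def altTerms (n : Int) (b : Int) (i : Int) : List String :=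
  if h : 0 < n ∧ 2 ≤ b then
    (if 0 < PySem.Int.mod n b then [fmtB (PySem.Int.mod n b) b i] else []) ++
      altTerms (PySem.Int.floordiv n b) b (i + 1)
  else []
termination_by n.toNat
decreasing_by exact pv_floordiv_toNat_lt n b h

def expand_in_base_alt (n : Int) (b : Int) : String :=
  if n < 0 ∨ b < 2 then "" else
  PySem.Str.join "+" (altTerms n b 0).reverse

-- ===== PRECONDITION & SPEC =====
-- Pre_ excludes exactly the inputs on which A raises (TypeError/ValueError): n < 0 or b < 2.
def Pre_expand_in_base (n : Int) (b : Int) : Prop := 0 ≤ n ∧ 2 ≤ b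
instance (n : Int) (b : Int) : Decidable (Pre_expand_in_base n b) := by
  unfold Pre_expand_in_base; infer_instance

def pvWitness_expand_in_base : Int × Int := (100, 3)

def Spec_expand_in_base (n : Int) (b : Int) (out : String) : Prop := out = expand_in_base_alt n b
instance (n : Int) (b : Int) (out : String) : Decidable (Spec_expand_in_base n b out) := by
  unfold Spec_expand_in_base; infer_instance

-- ===== CLAIM (what is proved, stated in full; the proofs are below) =====
def Claim_equal_expand_in_base : Prop := ∀ (n : Int) (b : Int), Dom_expand_in_base n b →
  Pre_expand_in_base n b → Spec_expand_in_base n b (expand_in_base n b)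

-- ===== LEMMAS AND PROOFS =====

-- with fuel left, `Nat.toDigitsCore` pushes at least one character
lemma toDigitsCore_len_succ (f : Nat) (hf : 1 ≤ f) : ∀ (n : Nat) (acc : List Char),
    acc.length + 1 ≤ (Nat.toDigitsCore 10 f n acc).length := by
  induction f with
  | zero => omega
  | succ f ih =>
    intro n acc
    simp only [Nat.toDigitsCore]
    split
    · simp
    · rcases Nat.eq_zero_or_pos f with hf0 | hf1
      · subst hf0; simp [Nat.toDigitsCore]
      · have := ih hf1 (n / 10) (Nat.digitChar (n % 10) :: acc)
        simp at this; omega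

lemma toDigits_small (m : Nat) (h : m < 10) : Nat.toDigits 10 m = [Nat.digitChar m] := by
  interval_cases m <;> rfl

lemma toDigits_big_len (m : Nat) (h : 10 ≤ m) : 2 ≤ (Nat.toDigits 10 m).length := by
  have h10 : ¬ m / 10 = 0 := by omega
  obtain ⟨f, hf⟩ : ∃ f, m = f + 1 := ⟨m - 1, by omega⟩
  subst hf
  rw [Nat.toDigits]
  simp only [Nat.toDigitsCore]
  rw [if_neg (by omega : ¬ (f + 1) / 10 = 0)]
  exact toDigitsCore_len_succ (f + 1) (by omega) ((f + 1) / 10)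
    [Nat.digitChar ((f + 1) % 10)]

lemma toDigits_ne_nil (m : Nat) : Nat.toDigits 10 m ≠ [] := by
  rcases lt_or_ge m 10 with h | h
  · rw [toDigits_small m h]; simp
  · have := toDigits_big_len m h
    intro hc; rw [hc] at this; simp at this

lemma toChars_nonneg (d : Int) (hd : 0 ≤ d) :
    PySem.Int.toChars d = Nat.toDigits 10 d.toNat := by
  simp [PySem.Int.toChars, not_lt.mpr hd]

lemma toStr_eq_digit_iff (d : Int) (hd : 0 ≤ d) (k : Nat) (hk : k < 10) :
    PySem.Int.toStr d = PySem.Int.toStr (k : Int) ↔ d = (k : Int) := by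
  constructor
  · intro h
    have h' : PySem.Int.toChars d = PySem.Int.toChars (k : Int) := by
      rw [← PySem.Int.toList_toStr, ← PySem.Int.toList_toStr, h]
    rw [toChars_nonneg d hd, toChars_nonneg _ (by omega)] at h'
    simp only [Int.toNat_natCast] at h'
    rw [toDigits_small k hk] at h'
    rcases lt_or_ge d.toNat 10 with hlt | hge
    · rw [toDigits_small _ hlt] at h'
      simp only [List.cons.injEq, and_true] at h'
      have : d.toNat = k := by
        interval_cases k <;> interval_cases hdd : d.toNat <;> simp_all [Nat.digitChar]
      omega
    · exfalso
      have := toDigits_big_len d.toNat hge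
      rw [h'] at this; simp at this
  · intro h; rw [h]

lemma toStr_ne_empty (d : Int) : PySem.Int.toStr d ≠ "" := by
  intro h
  have h' : PySem.Int.toChars d = [] := by
    rw [← PySem.Int.toList_toStr, h]; rfl
  by_cases hd : d < 0
  · simp [PySem.Int.toChars, hd] at h'
  · rw [toChars_nonneg d (by omega)] at h'
    exact toDigits_ne_nil _ h'

lemma append3_ne_empty (s m t : String) (hm : m ≠ "") : s ++ m ++ t ≠ "" := by
  intro h
  have h' := congrArg String.toList h
  simp only [String.toList_append] at h'
  rcases List.append_eq_nil_iff.mp (List.append_eq_nil_iff.mp h').1 with ⟨_, hm'⟩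
  exact hm (String.toList_inj.mp (by simpa using hm'))

-- for a strictly positive digit, A's string-compared formatting is B's int-compared one
lemma fmt_bridge (d : Int) (hd : 0 < d) (j : Int) (hj : 0 ≤ j) (b : Int) :
    fmtA (PySem.Int.toStr d) (PySem.Int.toStr j) (PySem.Int.toStr b) = fmtB d b j := by
  have h0 : PySem.Int.toStr d = PySem.Int.toStr 0 ↔ d = 0 := by
    simpa using toStr_eq_digit_iff d (by omega) 0 (by omega)
  have h1 : PySem.Int.toStr d = PySem.Int.toStr 1 ↔ d = 1 := by
    simpa using toStr_eq_digit_iff d (by omega) 1 (by omega)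
  have hp0 : PySem.Int.toStr j = PySem.Int.toStr 0 ↔ j = 0 := by
    simpa using toStr_eq_digit_iff j hj 0 (by omega)
  have hp1 : PySem.Int.toStr j = PySem.Int.toStr 1 ↔ j = 1 := by
    simpa using toStr_eq_digit_iff j hj 1 (by omega)
  have e0 : ("0" : String) = PySem.Int.toStr 0 := by decide
  have e1 : ("1" : String) = PySem.Int.toStr 1 := by decide
  unfold fmtA fmtB
  rw [e0, e1, if_neg (by rw [h0]; omega)]
  simp only [h1, hp0, hp1]

lemma fmtB_ne_empty (d : Int) (j : Int) (b : Int) : fmtB d b j ≠ "" := by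
  unfold fmtB
  split_ifs <;>
    first
      | decide
      | exact toStr_ne_empty _
      | exact append3_ne_empty _ _ _ (by decide)

-- A's format-and-filter of a digit-string list, all powers shifted up by j
def fmtList (R : List String) (b : Int) (j : Int) : List String :=
  ((List.range R.length).map (fun k =>
    fmtA (R.getD k "") (PySem.Int.toStr ((R.length : Int) - (k : Int) - 1 + j))
      (PySem.Int.toStr b))).filter (fun s => !(s == ""))

lemma fmtList_append (R : List String) (y : String) (b : Int) (j : Int) :
    fmtList (R ++ [y]) b j =
      fmtList R b (j + 1) ++
        ([fmtA y (PySem.Int.toStr j) (PySem.Int.toStr b)].filter (fun s => !(s == ""))) := by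
  unfold fmtList
  have hlen : (R ++ [y]).length = R.length + 1 := by simp
  rw [hlen, List.range_succ, List.map_append, List.filter_append]
  congr 2
  · apply List.map_congr_left
    intro k hk
    rw [List.mem_range] at hk
    rw [List.getD_append _ _ _ _ hk]
    congr 2
    push_cast; ring
  · simp only [List.map_cons, List.map_nil]
    congr 2
    · simp
    · congr 1
      push_cast; ring

-- main loop correspondence: A's formatted raw digit list of n at power offset j is the
-- reverse of B's term list of n started at counter j
lemma main_lemma (N : Nat) : ∀ (n b : Int), n.toNat ≤ N → 2 ≤ b → ∀ (j : Int), 0 ≤ j →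
    fmtList (pyRawList n b) b j = (altTerms n b j).reverse := by
  induction N with
  | zero =>
    intro n b hn hb j hj
    have hc : ¬ (0 < n ∧ 2 ≤ b) := by omega
    rw [pyRawList, dif_neg hc, altTerms, dif_neg hc]
    simp [fmtList]
  | succ N ih =>
    intro n b hn hb j hj
    by_cases hpos : 0 < n
    · have hc : 0 < n ∧ 2 ≤ b := ⟨hpos, hb⟩
      have hdesc : (PySem.Int.floordiv n b).toNat ≤ N := by
        have := pv_floordiv_toNat_lt n b hc
        omega
      have hdnn : 0 ≤ PySem.Int.mod n b := PySem.Int.mod_nonneg n (by omega)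
      by_cases hd0 : PySem.Int.mod n b = 0
      · rw [pyRawList, dif_pos hc, altTerms, dif_pos hc, fmtList_append,
          ih _ b hdesc hb (j + 1) (by omega), hd0, List.reverse_append]
        have hz : fmtA (PySem.Int.toStr 0) (PySem.Int.toStr j) (PySem.Int.toStr b) = "" := by
          unfold fmtA; rw [if_pos (by decide)]
        rw [hz]; simp
      · rw [pyRawList, dif_pos hc, altTerms, dif_pos hc, fmtList_append,
          ih _ b hdesc hb (j + 1) (by omega), fmt_bridge _ (by omega) j hj b,
          List.reverse_append, if_pos (by omega)]
        have hne := fmtB_ne_empty (PySem.Int.mod n b) j b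
        simp [List.filter_nil, hne]
    · have hc : ¬ (0 < n ∧ 2 ≤ b) := by omega
      rw [pyRawList, dif_neg hc, altTerms, dif_neg hc]
      simp [fmtList]

-- ===== VERDICT (by name: the statement is the Claim_ definition above) =====
theorem expand_in_base_spec : Claim_equal_expand_in_base := by
  intro n b _ hpre
  obtain ⟨hn, hb⟩ := hpre
  unfold Spec_expand_in_base expand_in_base expand_in_base_alt
  rw [if_neg (by omega), if_neg (by omega)]
  dsimp only
  congr 1
  have h := main_lemma n.toNat n b (by omega) hb 0 (by omega)
  rw [← h]
  unfold fmtList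
  congr 1
  apply List.map_congr_left
  intro k hk
  congr 2
  ring
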